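-- pv_equiv track=rewrite | github.com/MahammadRafi06/connectk-backend | app/services/auth_service.py | determine_connectk_group
-- ===== SOURCE A (Python) =====
-- def determine_connectk_group(groups: list[str], entra_config: dict) -> str:
--     """Map Entra ID group memberships to ConnectK roles."""
--     admin_groups = entra_config.get("admin_groups", [])
--     manager_groups = entra_config.get("manager_groups", [])
--
--     for g in groups:
--         if g in admin_groups:
--             return "admin"
--     for g in groups:
--         if g in manager_groups:
--             return "manager"
--     return "developer"
-- ===== SOURCE B (Python) =====
-- def determine_connectk_group(groups: list[str], entra_config: dict) -> str:
--     """Map Entra ID group memberships to ConnectK roles."""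
--     priority = {}
--     for g in entra_config.get("manager_groups", []):
--         priority[g] = 1
--     for g in entra_config.get("admin_groups", []):
--         priority[g] = 2
--     best = 0
--     for g in groups:
--         p = priority.get(g, 0)
--         if p > best:
--             best = p
--     if best == 2:
--         return "admin"
--     if best == 1:
--         return "manager"
--     return "developer"
-- ===== Notes on version B (the rewrite author's own statement) =====
-- stated objective: alternative
-- what changed: Replaces the two short-circuit scans of groups (each doing a linear membership test) with a pre-built group->priority dict (manager=1, admin=2 overriding) and a single max-priority pass over groups.
import Mathlib
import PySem

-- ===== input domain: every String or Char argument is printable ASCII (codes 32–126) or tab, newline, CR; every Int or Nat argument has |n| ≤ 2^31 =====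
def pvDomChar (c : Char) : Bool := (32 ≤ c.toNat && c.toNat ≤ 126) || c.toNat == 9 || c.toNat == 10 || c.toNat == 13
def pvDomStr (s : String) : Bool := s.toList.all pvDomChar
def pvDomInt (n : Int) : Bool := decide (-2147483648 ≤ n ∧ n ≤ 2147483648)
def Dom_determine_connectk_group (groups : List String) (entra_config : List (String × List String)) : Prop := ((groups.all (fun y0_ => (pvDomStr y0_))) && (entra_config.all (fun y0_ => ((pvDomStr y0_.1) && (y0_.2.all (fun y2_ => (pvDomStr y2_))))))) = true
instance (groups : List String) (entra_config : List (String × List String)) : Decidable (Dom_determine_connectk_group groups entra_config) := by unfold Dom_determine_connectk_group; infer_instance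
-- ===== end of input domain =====

-- B replaces A's two repeated short-circuit scans by one pre-built group→priority dict
-- (manager=1 then admin=2 overriding) and a single max-priority pass over `groups` (alternative decomposition).

-- entra_config.get(key, []): first-match lookup in the association list (Python dict convention)
def pvCfgGet (cfg : List (String × List String)) (k : String) : List String :=
  match cfg.find? (fun p => p.1 == k) with
  | some p => p.2
  | none => []

-- ===== PORT A =====
-- 'for g in groups: if g in members: return <r>' — early-return scan
def pvScan (gs : List String) (members : List String) : Bool :=
  match gs with
  | [] => false
  | g :: rest => if members.contains g then true else pvScan rest members

def determine_connectk_group (groups : List String) (entra_config : List (String × List String)) : String :=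
  let admin_groups := pvCfgGet entra_config "admin_groups"
  let manager_groups := pvCfgGet entra_config "manager_groups"
  if pvScan groups admin_groups then "admin"
  else if pvScan groups manager_groups then "manager"
  else "developer"

-- ===== PORT B =====
def determine_connectk_group_alt (groups : List String) (entra_config : List (String × List String)) : String :=
  let d1 := (pvCfgGet entra_config "manager_groups").foldl (fun d g => d.insert g (1 : Int)) (PySem.Dict.empty : PySem.Dict String Int)
  let d2 := (pvCfgGet entra_config "admin_groups").foldl (fun d g => d.insert g (2 : Int)) d1
  let best := groups.foldl (fun b g => let p := d2.getD g 0; if p > b then p else b) (0 : Int)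
  if best == 2 then "admin"
  else if best == 1 then "manager"
  else "developer"

-- ===== PRECONDITION & SPEC =====
def Spec_determine_connectk_group (groups : List String) (entra_config : List (String × List String)) (out : String) : Prop := out = determine_connectk_group_alt groups entra_config
instance (groups : List String) (entra_config : List (String × List String)) (out : String) : Decidable (Spec_determine_connectk_group groups entra_config out) := by unfold Spec_determine_connectk_group; infer_instance

-- ===== CLAIM (what is proved, stated in full; the proofs are below) =====
def Claim_equal_determine_connectk_group : Prop := ∀ (groups : List String) (entra_config : List (String × List String)), Dom_determine_connectk_group groups entra_config → Spec_determine_connectk_group groups entra_config (determine_connectk_group groups entra_config)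

-- ===== LEMMAS AND PROOFS =====

theorem foldl_insert_const_getD (l : List String) (d : PySem.Dict String Int) (v : Int) (g : String) :
    (l.foldl (fun d x => d.insert x v) d).getD g 0 = if l.contains g then v else d.getD g 0 := by
  induction l generalizing d with
  | nil => simp
  | cons x xs ih =>
    simp only [List.foldl_cons, ih, List.contains_cons]
    by_cases hx : g = x <;> simp [hx, PySem.Dict.getD_insert]

theorem lookup_d2 (am mm : List String) (g : String) :
    ((am.foldl (fun d x => d.insert x (2 : Int))
        (mm.foldl (fun d x => d.insert x (1 : Int)) PySem.Dict.empty)).getD g 0)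
      = if am.contains g then 2 else if mm.contains g then 1 else 0 := by
  rw [foldl_insert_const_getD, foldl_insert_const_getD]
  simp [PySem.Dict.getD_empty]

theorem fold_best (am mm : List String) (P : String → Int)
    (hP : ∀ g, P g = if am.contains g then 2 else if mm.contains g then 1 else 0) :
    ∀ (gs : List String) (a : Int), 0 ≤ a →
      gs.foldl (fun b g => if P g > b then P g else b) a
        = if pvScan gs am then max a 2 else if pvScan gs mm then max a 1 else a := by
  intro gs
  induction gs with
  | nil => intro a _; simp [pvScan]
  | cons g rest ih =>
    intro a h0
    simp only [List.foldl_cons, pvScan, hP g]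
    rw [ih _ (by split_ifs <;> omega)]
    by_cases ha : g ∈ am <;> by_cases hm : g ∈ mm <;>
      simp [ha, hm] <;> split_ifs <;> omega

theorem determine_equals (groups : List String) (entra_config : List (String × List String)) :
    determine_connectk_group groups entra_config = determine_connectk_group_alt groups entra_config := by
  simp only [determine_connectk_group, determine_connectk_group_alt]
  rw [fold_best (pvCfgGet entra_config "admin_groups") (pvCfgGet entra_config "manager_groups")
      _ (fun g => lookup_d2 _ _ g) groups 0 le_rfl]
  by_cases hA : pvScan groups (pvCfgGet entra_config "admin_groups") = true <;>
    by_cases hM : pvScan groups (pvCfgGet entra_config "manager_groups") = true <;>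
      simp [hA, hM]

-- ===== VERDICT (by name: the statement is the Claim_ definition above) =====
theorem determine_connectk_group_spec : Claim_equal_determine_connectk_group := by
  intro groups entra_config _
  unfold Spec_determine_connectk_group
  exact determine_equals groups entra_config
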